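-- pv_equiv track=rewrite | github.com/embydextrous/Interview | stack/29-checkIfTwoExpressionsWithBracketsAreSame.py | evaluateSignsOfAll
-- ===== SOURCE A (Python) =====
-- MAX_OPERANDS = 26
--
-- def checkLocalSign(s, i):
--     if i == 0:
--         return True
--     if s[i - 1] == "-":
--         return False
--     return True
--
-- def evaluateSignsOfAll(exp):
--     allOperandsSign = [0] * MAX_OPERANDS
--     s = [True]
--     for i in range(len(exp)):
--         if exp[i] == "(":
--             s.append(not checkLocalSign(exp, i) ^ s[-1])
--         elif exp[i] == ")":
--             s.pop()
--         elif exp[i] != '-' and exp[i] != '+':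
--             if s[-1]:
--                 allOperandsSign[ord(exp[i]) - ord('a')] = 1 if checkLocalSign(exp, i) else -1
--             else:
--                 allOperandsSign[ord(exp[i]) - ord('a')] = -1 if checkLocalSign(exp, i) else 1
--     return allOperandsSign
-- ===== SOURCE B (Python) =====
-- MAX_OPERANDS = 26
--
-- def evaluateSignsOfAll(exp):
--     # Recursive-descent: the call stack replaces the explicit sign stack.
--     res = [0] * MAX_OPERANDS
--     n = len(exp)
--
--     def go(i, sign):
--         # scan from i under accumulated sign; on an unmatched ')' return the
--         # index just past it, at the end return n
--         while i < n:
--             c = exp[i]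
--             local = i == 0 or exp[i - 1] != '-'
--             if c == ')':
--                 return i + 1
--             if c == '(':
--                 i = go(i + 1, local == sign)
--                 continue
--             if c != '-' and c != '+':
--                 res[ord(c) - ord('a')] = 1 if local == sign else -1
--             i += 1
--         return i
--
--     go(0, True)
--     return res
-- ===== Notes on version B (the rewrite author's own statement) =====
-- stated objective: alternative
-- what changed: Replaces the explicit boolean sign stack with a recursive-descent scanner that carries the accumulated sign on the call stack and recurses into each '(' group, returning at the matching ')'.
import Mathlib
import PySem

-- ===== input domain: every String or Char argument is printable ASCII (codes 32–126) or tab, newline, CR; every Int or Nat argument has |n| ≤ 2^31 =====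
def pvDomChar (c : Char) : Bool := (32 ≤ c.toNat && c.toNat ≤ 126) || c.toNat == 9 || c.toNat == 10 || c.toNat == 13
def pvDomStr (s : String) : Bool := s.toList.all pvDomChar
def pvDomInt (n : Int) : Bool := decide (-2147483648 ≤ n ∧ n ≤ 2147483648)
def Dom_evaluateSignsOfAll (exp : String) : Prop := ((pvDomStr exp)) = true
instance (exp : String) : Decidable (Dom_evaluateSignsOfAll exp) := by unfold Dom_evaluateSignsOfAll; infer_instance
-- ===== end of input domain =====

-- B replaces A's explicit boolean sign stack by a recursive-descent scanner (call stack
-- carries the sign); same return value on every input where A returns (objective: alternative).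

-- ===== PORT A =====
-- shared tiny helper: the Python statement `allOperandsSign[ord(c)-ord('a')] = v`
-- (Python wraps a negative index by +26; an out-of-range index raises IndexError,
-- which Pre_ excludes — there the port leaves the list unchanged)
def writeSign (r : List Int) (c : Char) (v : Int) : List Int :=
  let idx : Int := (c.toNat : Int) - 97
  let j : Int := if idx < 0 then idx + 26 else idx
  if 0 ≤ j ∧ j < 26 then r.set j.toNat v else r

-- checkLocalSign(s, i): carried prev = s[i-1] (none at i = 0)
def checkLocalSign (prev : Option Char) : Bool :=
  match prev with
  | none => true
  | some c => !(c == '-')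

-- A's loop over range(len(exp)) as structural recursion over the characters,
-- state = (prev char, result list, sign stack with top at the head).
-- Where Python A raises IndexError (stack access on an empty stack), the port
-- halts returning the current result list; Pre_ excludes those inputs.
def arun : List Char → Option Char → List Int → List Bool → List Int
  | [], _, r, _ => r
  | c :: l, prev, r, s =>
    if c = '(' then
      match s with
      | top :: _ => arun l (some c) r ((!(checkLocalSign prev != top)) :: s)
      | [] => r
    else if c = ')' then
      match s with
      | _ :: rest => arun l (some c) r rest
      | [] => r
    else if c ≠ '-' ∧ c ≠ '+' then
      match s with
      | top :: _ =>
        arun l (some c) (writeSign r c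
          (if top then (if checkLocalSign prev then 1 else -1)
           else (if checkLocalSign prev then -1 else 1))) s
      | [] => r
    else arun l (some c) r s

def evaluateSignsOfAll (exp : String) : List Int :=
  arun exp.toList none (List.replicate 26 0) [true]

-- ===== PORT B =====
-- Source B's go: scan under accumulated sign, recurse at '(', return remainder after an
-- unmatched ')'; fuel (> remaining length) only makes the recursion structurally total.
def bgo : Nat → List Char → Option Char → Bool → List Int → List Int × List Char
  | 0, l, _, _, r => (r, l)
  | _ + 1, [], _, _, r => (r, [])
  | fuel + 1, c :: l, prev, sign, r =>
    let loc : Bool := !(prev == some '-')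
    if c = ')' then (r, l)
    else if c = '(' then
      let p := bgo fuel l (some '(') (loc == sign) r
      bgo fuel p.2 (some ')') sign p.1
    else if c ≠ '-' ∧ c ≠ '+' then
      bgo fuel l (some c) sign (writeSign r c (if loc == sign then 1 else -1))
    else bgo fuel l (some c) sign r

def evaluateSignsOfAll_alt (exp : String) : List Int :=
  (bgo (exp.toList.length + 1) exp.toList none true (List.replicate 26 0)).1

-- ===== PRECONDITION & SPEC =====
-- Pre_ excludes exactly the inputs where Python A raises: a stack access after the
-- sentinel was popped (some prefix has more ')' than '(' before a non-sign char) or an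
-- operand character whose code puts ord(c)-ord('a') outside Python's index range [-26,25].
def Pre_evaluateSignsOfAll (exp : String) : Prop :=
  ∀ i < exp.toList.length,
    ((exp.toList[i]! ≠ '+' ∧ exp.toList[i]! ≠ '-') →
       (exp.toList.take i).count ')' ≤ (exp.toList.take i).count '(') ∧
    (exp.toList[i]! = '(' ∨ exp.toList[i]! = ')' ∨ exp.toList[i]! = '+' ∨ exp.toList[i]! = '-' ∨
       (71 ≤ (exp.toList[i]!).toNat ∧ (exp.toList[i]!).toNat ≤ 122))
instance (exp : String) : Decidable (Pre_evaluateSignsOfAll exp) := by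
  unfold Pre_evaluateSignsOfAll; infer_instance

def pvWitness_evaluateSignsOfAll : String := "a-(b+c)"

def Spec_evaluateSignsOfAll (exp : String) (out : List Int) : Prop := out = evaluateSignsOfAll_alt exp
instance (exp : String) (out : List Int) : Decidable (Spec_evaluateSignsOfAll exp out) := by unfold Spec_evaluateSignsOfAll; infer_instance

-- ===== CLAIM (what is proved, stated in full; the proofs are below) =====
def Claim_equal_evaluateSignsOfAll : Prop := ∀ (exp : String), Dom_evaluateSignsOfAll exp → Pre_evaluateSignsOfAll exp → Spec_evaluateSignsOfAll exp (evaluateSignsOfAll exp)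

-- ===== LEMMAS AND PROOFS =====

-- bgo never lengthens the remainder
theorem bgo_len (fuel : Nat) : ∀ (l : List Char) (prev : Option Char) (sign : Bool)
    (r : List Int), (bgo fuel l prev sign r).2.length ≤ l.length := by
  induction fuel with
  | zero => intro l prev sign r; simp [bgo]
  | succ fuel ih =>
    intro l prev sign r
    cases l with
    | nil => simp [bgo]
    | cons c l =>
      simp only [bgo]
      split
      · simpa using Nat.le_succ _
      · split
        · exact le_trans (le_trans (ih _ _ _ _) (ih _ _ _ _)) (Nat.le_succ _)
        · split
          · exact le_trans (ih _ _ _ _) (Nat.le_succ _)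
          · exact le_trans (ih _ _ _ _) (Nat.le_succ _)

-- with the halt convention, arun on an empty stack returns the result unchanged
theorem arun_nil_stack : ∀ (l : List Char) (prev : Option Char) (r : List Int),
    arun l prev r [] = r := by
  intro l
  induction l with
  | nil => intro prev r; simp [arun]
  | cons c l ih =>
    intro prev r
    simp only [arun]
    split
    · rfl
    · split
      · rfl
      · split
        · rfl
        · exact ih _ _

-- the local sign A reads from exp[i-1] equals the boolean B computes from prev
theorem checkLocal_eq (prev : Option Char) : checkLocalSign prev = !(prev == some '-') := by
  cases prev <;> simp [checkLocalSign]

-- A's pushed value and B's passed-down sign coincide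
theorem push_eq (x top : Bool) : (!(x != top)) = (x == top) := by
  cases x <;> cases top <;> rfl

-- the two operand values coincide
theorem val_eq (top loc : Bool) :
    (if top then (if loc then (1:Int) else -1) else (if loc then -1 else 1)) =
    (if (loc == top) then 1 else -1) := by
  cases top <;> cases loc <;> rfl

-- key invariant: one level of A's explicit stack corresponds to one call of B's go
theorem key (fuel : Nat) : ∀ (l : List Char) (prev : Option Char) (sign : Bool)
    (S : List Bool) (r : List Int), l.length < fuel →
    arun l prev r (sign :: S) =
      arun (bgo fuel l prev sign r).2 (some ')') (bgo fuel l prev sign r).1 S := by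
  induction fuel with
  | zero => intro l prev sign S r h; omega
  | succ fuel ih =>
    intro l prev sign S r h
    cases l with
    | nil => simp [arun, bgo]
    | cons c l =>
      have hl : l.length < fuel := by simpa using Nat.lt_of_succ_lt_succ h
      by_cases h1 : c = '('
      · subst h1
        rw [show arun ('(' :: l) prev r (sign :: S) =
              arun l (some '(') r (((!(prev == some '-')) == sign) :: sign :: S) from by
            rw [arun, if_pos rfl, checkLocal_eq, push_eq]]
        rw [show bgo (fuel + 1) ('(' :: l) prev sign r =
              (let p := bgo fuel l (some '(') ((!(prev == some '-')) == sign) r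
               bgo fuel p.2 (some ')') sign p.1) from by
            rw [bgo]; rw [if_neg (by decide), if_pos rfl]]
        rw [ih l (some '(') ((!(prev == some '-')) == sign) (sign :: S) r hl]
        exact ih _ (some ')') sign S _ (lt_of_le_of_lt (bgo_len _ _ _ _ _) hl)
      · by_cases h2 : c = ')'
        · subst h2
          rw [show arun (')' :: l) prev r (sign :: S) = arun l (some ')') r S from by
              rw [arun, if_neg (by decide), if_pos rfl]]
          rw [show bgo (fuel + 1) (')' :: l) prev sign r = (r, l) from by
              rw [bgo, if_pos rfl]]
        · by_cases h3 : c ≠ '-' ∧ c ≠ '+'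
          · rw [show arun (c :: l) prev r (sign :: S) =
                  arun l (some c)
                    (writeSign r c (if ((!(prev == some '-')) == sign) then 1 else -1))
                    (sign :: S) from by
                rw [arun, if_neg h1, if_neg h2, if_pos h3, checkLocal_eq, val_eq]]
            rw [show bgo (fuel + 1) (c :: l) prev sign r =
                  bgo fuel l (some c) sign
                    (writeSign r c (if ((!(prev == some '-')) == sign) then 1 else -1)) from by
                rw [bgo]; rw [if_neg h2, if_neg h1, if_pos h3]]
            exact ih _ (some c) sign S _ hl
          · rw [show arun (c :: l) prev r (sign :: S) = arun l (some c) r (sign :: S) from by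
                rw [arun, if_neg h1, if_neg h2, if_neg h3]]
            rw [show bgo (fuel + 1) (c :: l) prev sign r = bgo fuel l (some c) sign r from by
                rw [bgo]; rw [if_neg h2, if_neg h1, if_neg h3]]
            exact ih _ (some c) sign S _ hl

-- ===== VERDICT (by name: the statement is the Claim_ definition above) =====
theorem evaluateSignsOfAll_spec : Claim_equal_evaluateSignsOfAll := by
  intro exp _ _
  unfold Spec_evaluateSignsOfAll evaluateSignsOfAll evaluateSignsOfAll_alt
  rw [key (exp.toList.length + 1) exp.toList none true [] (List.replicate 26 0)
    (Nat.lt_succ_self _)]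
  exact arun_nil_stack _ _ _
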